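-- pv_equiv track=rewrite | github.com/waterfeet/DoroPet_V3 | opendoro/src/core/memory_manager.py | format_long_term_memories
-- ===== SOURCE A (Python) =====
-- from typing import List, Dict, Optional
--
-- def format_long_term_memories(memories: List[Dict]) -> str:
--     """格式化长期记忆"""
--     lines = []
--
--     # 按类别分组
--     facts = [m for m in memories if m["category"] == "fact"]
--     preferences = [m for m in memories if m["category"] == "preference"]
--     events = [m for m in memories if m["category"] == "event"]
--
--     if facts:
--         lines.append("【用户信息】")
--         for f in facts:
--             lines.append(f"- {f['content']}")
--
--     if preferences:
--         lines.append("\n【用户偏好】")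
--         for p in preferences:
--             lines.append(f"- {p['content']}")
--
--     if events:
--         lines.append("\n【重要事件】")
--         for e in events:
--             lines.append(f"- {e['content']}")
--
--     return "\n".join(lines)
-- ===== SOURCE B (Python) =====
-- def format_long_term_memories(memories):
--     """格式化长期记忆 — one grouping pass + a fixed (category, header) table."""
--     groups = {}
--     for m in memories:
--         groups.setdefault(m["category"], []).append(m)
--     lines = []
--     for key, header in (("fact", "【用户信息】"),
--                         ("preference", "\n【用户偏好】"),
--                         ("event", "\n【重要事件】")):
--         items = groups.get(key, [])
--         if items:
--             lines.append(header)
--             for item in items: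
--                 lines.append(f"- {item['content']}")
--     return "\n".join(lines)
-- ===== Notes on version B (the rewrite author's own statement) =====
-- stated objective: alternative
-- what changed: Replaces A's three separate filter passes and three copy-pasted if-blocks by a single grouping pass into a dict plus one loop over a fixed (category, header) table.
import Mathlib
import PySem

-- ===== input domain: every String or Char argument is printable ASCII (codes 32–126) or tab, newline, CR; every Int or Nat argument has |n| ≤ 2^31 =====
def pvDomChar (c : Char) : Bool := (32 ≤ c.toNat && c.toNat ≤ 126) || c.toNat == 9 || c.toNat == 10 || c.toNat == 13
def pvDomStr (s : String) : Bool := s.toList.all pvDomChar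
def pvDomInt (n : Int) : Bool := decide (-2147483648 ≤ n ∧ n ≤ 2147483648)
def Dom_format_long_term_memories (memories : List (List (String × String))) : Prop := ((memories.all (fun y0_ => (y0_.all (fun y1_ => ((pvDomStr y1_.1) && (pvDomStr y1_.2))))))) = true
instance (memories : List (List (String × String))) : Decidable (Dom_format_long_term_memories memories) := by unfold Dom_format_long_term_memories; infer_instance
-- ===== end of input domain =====

-- B changes the decomposition (one grouping pass + a header table instead of three filters + three if-blocks); equivalence is about the return value.

-- shared primitive: Python's m[k] on a dict given as an association list (first match);
-- under Pre_ the key is always present, so the getD "" default is never reached.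
def pvItem (m : List (String × String)) (k : String) : String :=
  ((PySem.Dict.mk m).get? k).getD ""

-- ===== PORT A =====
def format_long_term_memories (memories : List (List (String × String))) : String :=
  let facts := memories.filter (fun m => pvItem m "category" == "fact")
  let preferences := memories.filter (fun m => pvItem m "category" == "preference")
  let events := memories.filter (fun m => pvItem m "category" == "event")
  let lines :=
    (if facts.isEmpty then [] else "【用户信息】" :: facts.map (fun f => "- " ++ pvItem f "content")) ++
    (if preferences.isEmpty then [] else "\n【用户偏好】" :: preferences.map (fun p => "- " ++ pvItem p "content")) ++
    (if events.isEmpty then [] else "\n【重要事件】" :: events.map (fun e => "- " ++ pvItem e "content"))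
  PySem.Str.join "\n" lines

-- ===== PORT B =====
def pvTable : List (String × String) :=
  [("fact", "【用户信息】"), ("preference", "\n【用户偏好】"), ("event", "\n【重要事件】")]

def format_long_term_memories_alt (memories : List (List (String × String))) : String :=
  let groups := memories.foldl
    (fun d m => d.modify (pvItem m "category") [] (· ++ [m])) PySem.Dict.empty
  let lines := pvTable.foldl
    (fun acc kh =>
      let items := groups.getD kh.1 []
      if items.isEmpty then acc
      else acc ++ kh.2 :: items.map (fun item => "- " ++ pvItem item "content")) []
  PySem.Str.join "\n" lines

-- ===== PRECONDITION & SPEC =====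
-- Pre_ excludes exactly the inputs where the Python A raises KeyError: a memory without a
-- "category" key, or a memory in one of the three printed categories without a "content" key.
def Pre_format_long_term_memories (memories : List (List (String × String))) : Prop :=
  (memories.all (fun m =>
    (PySem.Dict.mk m).contains "category" &&
    (!(pvItem m "category" == "fact" || pvItem m "category" == "preference" || pvItem m "category" == "event")
      || (PySem.Dict.mk m).contains "content"))) = true
instance (memories : List (List (String × String))) : Decidable (Pre_format_long_term_memories memories) := by unfold Pre_format_long_term_memories; infer_instance

def pvWitness_format_long_term_memories : (List (List (String × String))) :=
  [[("category", "fact"), ("content", "likes tea")], [("category", "event"), ("content", "met")]]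

def Spec_format_long_term_memories (memories : List (List (String × String))) (out : String) : Prop := out = format_long_term_memories_alt memories
instance (memories : List (List (String × String))) (out : String) : Decidable (Spec_format_long_term_memories memories out) := by unfold Spec_format_long_term_memories; infer_instance

-- ===== CLAIM (what is proved, stated in full; the proofs are below) =====
def Claim_equal_format_long_term_memories : Prop := ∀ (memories : List (List (String × String))), Dom_format_long_term_memories memories → Pre_format_long_term_memories memories → Spec_format_long_term_memories memories (format_long_term_memories memories)

-- ===== LEMMAS AND PROOFS =====

-- the grouping loop, characterised: each group is the filter of its category
theorem pv_group_getD (l : List (List (String × String))) (d : PySem.Dict String (List (List (String × String)))) (c : String) :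
    (l.foldl (fun d m => d.modify (pvItem m "category") [] (· ++ [m])) d).getD c []
      = d.getD c [] ++ l.filter (fun m => pvItem m "category" == c) := by
  induction l generalizing d with
  | nil => simp [List.filter]
  | cons m t ih =>
      simp only [List.foldl_cons, ih, List.filter_cons]
      rw [PySem.Dict.getD_modify]
      by_cases h : pvItem m "category" = c
      · simp [h]
      · simp [h, Ne.symm h]

theorem format_long_term_memories_spec : Claim_equal_format_long_term_memories := by
  intro memories _ _
  unfold Spec_format_long_term_memories format_long_term_memories format_long_term_memories_alt pvTable
  simp only [List.foldl_cons, List.foldl_nil, pv_group_getD, PySem.Dict.getD_empty,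
    List.nil_append]
  by_cases hf : (memories.filter (fun m => pvItem m "category" == "fact")).isEmpty <;>
  by_cases hp : (memories.filter (fun m => pvItem m "category" == "preference")).isEmpty <;>
  by_cases he : (memories.filter (fun m => pvItem m "category" == "event")).isEmpty <;>
  simp [hf, hp, he]
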